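-- pv_equiv track=rewrite | github.com/mtmosier/SFIWikiBot | SFIWikiBotLib/GeneralUtils.py | ConvertListToHtmlTable
-- ===== SOURCE A (Python) =====
-- def ConvertListToHtmlTable(tableData, tableHeader = None, tableTitle = None, tableClass = None, tableId = None, tableColumnTitleList = None):
--     rtnVal = ""
--     if len(tableData) > 0:
--         if tableHeader:
--             rtnVal += '<h3>{}</h3>\n'.format(tableHeader)
--         if tableTitle:
--             rtnVal += '<div style="display: inline-block;"><h4><span class="mw-headline" id="{0}"><div class="tableCaption">{0}</div></span></h4>'.format(tableTitle)
--
--         rtnVal += "<table"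
--         if tableId:
--             rtnVal += ' id="sf-{}"'.format(tableId)
--         if tableClass:
--             rtnVal += ' class="{}"'.format(tableClass)
--         rtnVal += ">\n"
--         rtnVal += "<thead>\n"
--
--         first = True
--         for row in tableData:
--             values = "<tr>\n"
--             headings = ""
--             if first:
--                 headings += "<tr>\n"
--
--
--             idx = 0
--             for key, val in row.items():
--                 if first:
--                     if tableColumnTitleList and len(tableColumnTitleList) > idx and tableColumnTitleList[idx]:
--                         headings += '<th scope="col"><span title="{}">{}</span></th>\n'.format(tableColumnTitleList[idx], key)
--                     else:
--                         headings += "<th>{}</th>\n".format(key)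
--                 values += "<td>{}</td>\n".format(val)
--                 idx += 1
--
--             rtnVal += headings
--             if first:
--                 rtnVal += "</thead>\n"
--                 rtnVal += "<tbody>\n"
--             rtnVal += values
--             first = False
--
--         rtnVal += "</tbody>\n"
--         rtnVal += "</table>\n\n"
--         if tableTitle:
--             rtnVal += '</div>'
--
--     return rtnVal
-- ===== SOURCE B (Python) =====
-- def ConvertListToHtmlTable(tableData, tableHeader=None, tableTitle=None, tableClass=None, tableId=None, tableColumnTitleList=None):
--     if not tableData:
--         return ""
--     parts = []
--     if tableHeader:
--         parts.append('<h3>{}</h3>\n'.format(tableHeader))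
--     if tableTitle:
--         parts.append('<div style="display: inline-block;"><h4><span class="mw-headline" id="{0}"><div class="tableCaption">{0}</div></span></h4>'.format(tableTitle))
--     openTag = "<table"
--     if tableId:
--         openTag += ' id="sf-{}"'.format(tableId)
--     if tableClass:
--         openTag += ' class="{}"'.format(tableClass)
--     parts.append(openTag + ">\n<thead>\n<tr>\n")
--     for idx, key in enumerate(tableData[0]):
--         title = tableColumnTitleList[idx] if tableColumnTitleList and idx < len(tableColumnTitleList) else None
--         if title:
--             parts.append('<th scope="col"><span title="{}">{}</span></th>\n'.format(title, key))
--         else: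
--             parts.append("<th>{}</th>\n".format(key))
--     parts.append("</thead>\n<tbody>\n")
--     for row in tableData:
--         parts.append("<tr>\n" + "".join("<td>{}</td>\n".format(val) for val in row.values()))
--     parts.append("</tbody>\n</table>\n\n")
--     if tableTitle:
--         parts.append('</div>')
--     return "".join(parts)
-- ===== Notes on version B (the rewrite author's own statement) =====
-- stated objective: simpler
-- what changed: Replaces A's single loop with a first-row flag (building headings and values together and interleaving thead/tbody emission) by a flat emission: heading row computed once from tableData[0] via enumerate, then a separate body-only pass over all rows, joined at the end.
import Mathlib
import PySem

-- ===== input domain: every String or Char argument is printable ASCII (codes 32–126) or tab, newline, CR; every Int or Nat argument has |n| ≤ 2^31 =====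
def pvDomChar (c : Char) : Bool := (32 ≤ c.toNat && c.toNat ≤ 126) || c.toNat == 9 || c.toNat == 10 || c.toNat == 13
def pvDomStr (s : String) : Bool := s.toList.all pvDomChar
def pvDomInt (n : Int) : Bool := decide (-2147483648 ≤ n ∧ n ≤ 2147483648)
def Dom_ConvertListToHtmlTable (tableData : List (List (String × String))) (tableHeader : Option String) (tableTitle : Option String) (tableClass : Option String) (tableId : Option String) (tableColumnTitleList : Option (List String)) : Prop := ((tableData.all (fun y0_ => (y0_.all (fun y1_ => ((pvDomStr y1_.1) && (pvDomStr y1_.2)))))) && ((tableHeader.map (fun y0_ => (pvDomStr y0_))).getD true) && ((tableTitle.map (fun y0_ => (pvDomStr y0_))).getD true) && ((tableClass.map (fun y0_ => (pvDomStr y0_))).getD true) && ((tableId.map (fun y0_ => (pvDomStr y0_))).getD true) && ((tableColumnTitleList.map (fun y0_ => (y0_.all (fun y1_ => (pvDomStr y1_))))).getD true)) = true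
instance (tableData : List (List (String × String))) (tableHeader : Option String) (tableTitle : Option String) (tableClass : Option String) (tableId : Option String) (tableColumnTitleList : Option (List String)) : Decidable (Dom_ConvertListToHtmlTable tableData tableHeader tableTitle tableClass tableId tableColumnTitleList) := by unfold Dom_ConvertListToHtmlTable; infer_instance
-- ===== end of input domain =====

-- ===== PORT A =====
-- B re-decomposes A's single first-flagged loop into a one-shot heading pass over the
-- first row plus a separate body pass (objective: simpler decomposition, same cost).

/-- Python truthiness of an optional string (`if s:`): None and "" are falsy. -/
def pyTruthy : Option String → Bool
  | none => false
  | some s => s != ""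

/-- A's inner `for key, val in row.items()` loop: state (values, headings, idx). -/
def aRowLoop (first : Bool) (tct : Option (List String)) :
    List (String × String) → String → String → Int → String × String
  | [], values, headings, _idx => (values, headings)
  | (key, val) :: rest, values, headings, idx =>
    let headings :=
      if first then
        if (tct.getD [] != []) && decide (idx < ((tct.getD []).length : Int))
            && pyTruthy (PySem.List.pyGet? (tct.getD []) idx) then
          headings ++ "<th scope=\"col\"><span title=\""
            ++ ((PySem.List.pyGet? (tct.getD []) idx).getD "") ++ "\">" ++ key ++ "</span></th>\n"
        else
          headings ++ "<th>" ++ key ++ "</th>\n"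
      else headings
    aRowLoop first tct rest (values ++ "<td>" ++ val ++ "</td>\n") headings (idx + 1)

/-- A's outer `for row in tableData` loop carrying (rtnVal, first). -/
def aTableLoop (tct : Option (List String)) :
    List (List (String × String)) → String → Bool → String
  | [], rtnVal, _first => rtnVal
  | row :: rest, rtnVal, first =>
    let vh := aRowLoop first tct row "<tr>\n" (if first then "<tr>\n" else "") 0
    let rtnVal := rtnVal ++ vh.2
    let rtnVal := if first then rtnVal ++ "</thead>\n" ++ "<tbody>\n" else rtnVal
    aTableLoop tct rest (rtnVal ++ vh.1) false

def ConvertListToHtmlTable (tableData : List (List (String × String))) (tableHeader : Option String) (tableTitle : Option String) (tableClass : Option String) (tableId : Option String) (tableColumnTitleList : Option (List String)) : String :=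
  let rtnVal := ""
  if tableData.length > 0 then
    let rtnVal := if pyTruthy tableHeader then
        rtnVal ++ "<h3>" ++ tableHeader.getD "" ++ "</h3>\n" else rtnVal
    let rtnVal := if pyTruthy tableTitle then
        rtnVal ++ "<div style=\"display: inline-block;\"><h4><span class=\"mw-headline\" id=\""
          ++ tableTitle.getD "" ++ "\"><div class=\"tableCaption\">" ++ tableTitle.getD ""
          ++ "</div></span></h4>" else rtnVal
    let rtnVal := rtnVal ++ "<table"
    let rtnVal := if pyTruthy tableId then
        rtnVal ++ " id=\"sf-" ++ tableId.getD "" ++ "\"" else rtnVal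
    let rtnVal := if pyTruthy tableClass then
        rtnVal ++ " class=\"" ++ tableClass.getD "" ++ "\"" else rtnVal
    let rtnVal := rtnVal ++ ">\n"
    let rtnVal := rtnVal ++ "<thead>\n"
    let rtnVal := aTableLoop tableColumnTitleList tableData rtnVal true
    let rtnVal := rtnVal ++ "</tbody>\n"
    let rtnVal := rtnVal ++ "</table>\n\n"
    if pyTruthy tableTitle then rtnVal ++ "</div>" else rtnVal
  else rtnVal

-- ===== PORT B =====

/-- B: heading cell for key at position idx (`title = ... if ... else None`). -/
def bHeadCell (tct : Option (List String)) (idx : Int) (key : String) : String :=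
  let title : Option String :=
    match tct with
    | some l => if (l != []) && decide (idx < (l.length : Int)) then PySem.List.pyGet? l idx else none
    | none => none
  match title with
  | some t =>
    if t != "" then
      "<th scope=\"col\"><span title=\"" ++ t ++ "\">" ++ key ++ "</span></th>\n"
    else "<th>" ++ key ++ "</th>\n"
  | none => "<th>" ++ key ++ "</th>\n"

/-- B: one body row, `"<tr>\n" + "".join(td cells)`. -/
def bBodyRow (row : List (String × String)) : String :=
  "<tr>\n" ++ PySem.Str.join "" (row.map (fun kv => "<td>" ++ kv.2 ++ "</td>\n"))

def ConvertListToHtmlTable_alt (tableData : List (List (String × String))) (tableHeader : Option String) (tableTitle : Option String) (tableClass : Option String) (tableId : Option String) (tableColumnTitleList : Option (List String)) : String :=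
  match tableData with
  | [] => ""
  | r0 :: _ =>
    let openTag := "<table"
    let openTag := if pyTruthy tableId then openTag ++ " id=\"sf-" ++ tableId.getD "" ++ "\"" else openTag
    let openTag := if pyTruthy tableClass then openTag ++ " class=\"" ++ tableClass.getD "" ++ "\"" else openTag
    let parts : List String :=
      (if pyTruthy tableHeader then ["<h3>" ++ tableHeader.getD "" ++ "</h3>\n"] else [])
      ++ (if pyTruthy tableTitle then
            ["<div style=\"display: inline-block;\"><h4><span class=\"mw-headline\" id=\""
              ++ tableTitle.getD "" ++ "\"><div class=\"tableCaption\">" ++ tableTitle.getD ""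
              ++ "</div></span></h4>"] else [])
      ++ [openTag ++ ">\n<thead>\n<tr>\n"]
      ++ (PySem.List.enumerate r0 0).map (fun p => bHeadCell tableColumnTitleList p.1 p.2.1)
      ++ ["</thead>\n<tbody>\n"]
      ++ tableData.map bBodyRow
      ++ ["</tbody>\n</table>\n\n"]
      ++ (if pyTruthy tableTitle then ["</div>"] else [])
    PySem.Str.join "" parts

-- ===== PRECONDITION & SPEC =====
def Spec_ConvertListToHtmlTable (tableData : List (List (String × String))) (tableHeader : Option String) (tableTitle : Option String) (tableClass : Option String) (tableId : Option String) (tableColumnTitleList : Option (List String)) (out : String) : Prop := out = ConvertListToHtmlTable_alt tableData tableHeader tableTitle tableClass tableId tableColumnTitleList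
instance (tableData : List (List (String × String))) (tableHeader : Option String) (tableTitle : Option String) (tableClass : Option String) (tableId : Option String) (tableColumnTitleList : Option (List String)) (out : String) : Decidable (Spec_ConvertListToHtmlTable tableData tableHeader tableTitle tableClass tableId tableColumnTitleList out) := by unfold Spec_ConvertListToHtmlTable; infer_instance

-- ===== CLAIM (what is proved, stated in full; the proofs are below) =====
def Claim_equal_ConvertListToHtmlTable : Prop := ∀ (tableData : List (List (String × String))) (tableHeader : Option String) (tableTitle : Option String) (tableClass : Option String) (tableId : Option String) (tableColumnTitleList : Option (List String)), Dom_ConvertListToHtmlTable tableData tableHeader tableTitle tableClass tableId tableColumnTitleList → Spec_ConvertListToHtmlTable tableData tableHeader tableTitle tableClass tableId tableColumnTitleList (ConvertListToHtmlTable tableData tableHeader tableTitle tableClass tableId tableColumnTitleList)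

-- ===== LEMMAS AND PROOFS =====

theorem join_empty_nil : PySem.Str.join "" [] = "" := by
  rw [← String.toList_inj]
  simp [PySem.Str.toList_join, PySem.Chars.join_nil]

theorem join_empty_cons (x : String) (xs : List String) :
    PySem.Str.join "" (x :: xs) = x ++ PySem.Str.join "" xs := by
  rw [← String.toList_inj]
  cases xs with
  | nil =>
    simp [PySem.Str.toList_join, PySem.Chars.join, List.intercalate]
  | cons y ys =>
    simp [PySem.Str.toList_join, PySem.Chars.join_cons_cons]

theorem join_empty_append (a b : List String) :
    PySem.Str.join "" (a ++ b) = PySem.Str.join "" a ++ PySem.Str.join "" b := by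
  induction a with
  | nil => simp [join_empty_nil]
  | cons x xs ih => simp [join_empty_cons, ih, String.append_assoc]

/-- The cells string of one body row. -/
def bodyCells (row : List (String × String)) : String :=
  PySem.Str.join "" (row.map (fun kv => "<td>" ++ kv.2 ++ "</td>\n"))

theorem aRowLoop_false (tct : Option (List String)) (row : List (String × String))
    (values headings : String) (idx : Int) :
    aRowLoop false tct row values headings idx = (values ++ bodyCells row, headings) := by
  induction row generalizing values idx with
  | nil => simp [aRowLoop, bodyCells, join_empty_nil]
  | cons kv rest ih =>
    obtain ⟨k, v⟩ := kv
    simp [aRowLoop, ih, bodyCells, join_empty_cons, String.append_assoc]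

/-- A's first-row cell (with its `headings +=`) equals B's bHeadCell. -/
theorem cell_eq (tct : Option (List String)) (idx : Int) (key heads : String) :
    (if (tct.getD [] != []) && decide (idx < ((tct.getD []).length : Int))
        && pyTruthy (PySem.List.pyGet? (tct.getD []) idx) then
      heads ++ "<th scope=\"col\"><span title=\""
        ++ ((PySem.List.pyGet? (tct.getD []) idx).getD "") ++ "\">" ++ key ++ "</span></th>\n"
    else heads ++ "<th>" ++ key ++ "</th>\n") = heads ++ bHeadCell tct idx key := by
  cases tct with
  | none => simp [bHeadCell, pyTruthy, String.append_assoc]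
  | some l =>
    simp only [bHeadCell, Option.getD_some]
    cases h1 : (l != []) && decide (idx < (l.length : Int)) with
    | false =>
      rcases Bool.and_eq_false_iff.mp h1 with h | h
      · simp [h, String.append_assoc]
      · have h' : ¬ idx < (l.length : Int) := by simpa using h
        simp [h', String.append_assoc]
    | true =>
      obtain ⟨ha, hb⟩ : l ≠ [] ∧ idx < (l.length : Int) := by simpa using h1
      cases hg : PySem.List.pyGet? l idx with
      | none => simp [hb, pyTruthy, String.append_assoc]
      | some t =>
        cases htb : (t != "") <;>
          simp [ha, hb, pyTruthy, htb, String.append_assoc]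

theorem aRowLoop_true (tct : Option (List String)) (row : List (String × String))
    (values headings : String) (idx : Int) :
    aRowLoop true tct row values headings idx =
      (values ++ bodyCells row,
       headings ++ PySem.Str.join ""
          ((PySem.List.enumerate row idx).map (fun p => bHeadCell tct p.1 p.2.1))) := by
  induction row generalizing values headings idx with
  | nil => simp [aRowLoop, bodyCells, join_empty_nil, PySem.List.enumerate_nil]
  | cons kv rest ih =>
    obtain ⟨k, v⟩ := kv
    simp only [aRowLoop, if_pos, ih]
    rw [cell_eq, PySem.List.enumerate_cons]
    simp [bodyCells, join_empty_cons, String.append_assoc]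

theorem aTableLoop_false (tct : Option (List String)) (rows : List (List (String × String)))
    (rtnVal : String) :
    aTableLoop tct rows rtnVal false = rtnVal ++ PySem.Str.join "" (rows.map bBodyRow) := by
  induction rows generalizing rtnVal with
  | nil => simp [aTableLoop, join_empty_nil]
  | cons row rest ih =>
    simp [aTableLoop, aRowLoop_false, ih, join_empty_cons, bBodyRow, bodyCells,
      String.append_assoc]

theorem aTableLoop_true (tct : Option (List String)) (r0 : List (String × String))
    (rest : List (List (String × String))) (rtnVal : String) :
    aTableLoop tct (r0 :: rest) rtnVal true =
      rtnVal ++ "<tr>\n"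
        ++ PySem.Str.join "" ((PySem.List.enumerate r0 0).map (fun p => bHeadCell tct p.1 p.2.1))
        ++ "</thead>\n" ++ "<tbody>\n"
        ++ bBodyRow r0
        ++ PySem.Str.join "" (rest.map bBodyRow) := by
  simp [aTableLoop, aRowLoop_true, aTableLoop_false, bBodyRow, bodyCells, String.append_assoc]

-- literal-splitting helpers (B merges adjacent literals that A emits piecewise)
theorem lit1 : (">\n<thead>\n<tr>\n" : String) = ">\n" ++ "<thead>\n" ++ "<tr>\n" := rfl
theorem lit2 : ("</thead>\n<tbody>\n" : String) = "</thead>\n" ++ "<tbody>\n" := rfl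
theorem lit3 : ("</tbody>\n</table>\n\n" : String) = "</tbody>\n" ++ "</table>\n\n" := rfl

-- ===== VERDICT (by name: the statement is the Claim_ definition above) =====
theorem ConvertListToHtmlTable_spec : Claim_equal_ConvertListToHtmlTable := by
  intro tableData tableHeader tableTitle tableClass tableId tableColumnTitleList _hDom
  unfold Spec_ConvertListToHtmlTable
  cases tableData with
  | nil => rfl
  | cons r0 rest =>
    simp only [ConvertListToHtmlTable, ConvertListToHtmlTable_alt, List.length_cons,
      Nat.succ_pos, if_pos, aTableLoop_true]
    rw [join_empty_append, join_empty_append, join_empty_append, join_empty_append,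
      join_empty_append, join_empty_append]
    split_ifs <;>
      · simp [join_empty_cons, join_empty_nil, lit1, lit2, lit3, bBodyRow,
          String.append_assoc]
        try simp only [← String.append_assoc]
        try simp [String.append_assoc]
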